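-- pv_equiv track=rewrite | github.com/Ed-Flack/CS50-2023 | week6/pset6/sentimental-credit/credit-regex.py | everyOtherDigitFromEndMultipliedByTwoAndProductsDigitsAddedTogether
-- ===== SOURCE A (Python) =====
-- def everyOtherDigitFromEndMultipliedByTwoAndProductsDigitsAddedTogether(cardNumber):
--     total = 0
--     for i in range(len(cardNumber) - 2, -1, -2):
--         number = str(int(cardNumber[i]) * 2)
--         if len(number) > 1:
--             for j in range(len(number)):
--                 total += int(number[j])
--         else:
--             total += int(number)
--     return total
-- ===== SOURCE B (Python) =====
-- def everyOtherDigitFromEndMultipliedByTwoAndProductsDigitsAddedTogether(cardNumber):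
--     # Aggregate identity: the digit-sum of 2*d is 2*d - 9*[d >= 5], so the whole
--     # total is 2*sum(digits) - 9*count(digits >= 5): no per-digit accumulation loop.
--     digits = [int(c) for c in cardNumber[-2::-2]]
--     return 2 * sum(digits) - 9 * sum(1 for d in digits if d >= 5)
-- ===== Notes on version B (the rewrite author's own statement) =====
-- stated objective: alternative
-- what changed: B replaces A's per-index loop with its inner digit-summing loop by staged aggregation: it extracts the every-other digits from the slice cardNumber[-2::-2] and returns the closed formula 2*sum(digits) - 9*count(digits >= 5), using the identity digitsum(2d) = 2d - 9*[d>=5].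
import Mathlib
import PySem

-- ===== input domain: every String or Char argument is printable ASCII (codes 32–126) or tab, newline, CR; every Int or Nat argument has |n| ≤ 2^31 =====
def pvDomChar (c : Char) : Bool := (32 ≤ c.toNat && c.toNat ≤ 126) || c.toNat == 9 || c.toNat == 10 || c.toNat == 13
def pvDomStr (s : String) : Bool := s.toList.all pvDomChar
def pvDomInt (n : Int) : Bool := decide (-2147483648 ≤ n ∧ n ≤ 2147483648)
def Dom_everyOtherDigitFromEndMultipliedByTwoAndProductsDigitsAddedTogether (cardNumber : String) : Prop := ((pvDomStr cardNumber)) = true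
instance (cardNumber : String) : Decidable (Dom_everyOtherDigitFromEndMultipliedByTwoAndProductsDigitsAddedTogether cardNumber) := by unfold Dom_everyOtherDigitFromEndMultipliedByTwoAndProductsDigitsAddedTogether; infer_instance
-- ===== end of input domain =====

-- B replaces A's per-index loop with inner digit-sum loop by staged aggregation:
-- extract the every-other digits, then return 2*sum - 9*count(d >= 5) (objective: alternative).

-- ===== PORT A =====
-- loop body of A's for-loop, applied to the character cardNumber[i]:
-- number = str(int(c) * 2); if len(number) > 1: sum its digits; else: add int(number)
def pvNumberStr (c : Char) : String := PySem.Int.toStr ((PySem.Int.ofChars? [c]).getD 0 * 2)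

def pvDigitDoubled (total : Int) (c : Char) : Int :=
  if 1 < PySem.Str.len (pvNumberStr c) then
    (PySem.List.pyRange 0 (PySem.Str.len (pvNumberStr c)) 1).foldl
      (fun t j => t + (PySem.Int.ofChars? [PySem.List.pyGetD (pvNumberStr c).toList j ' ']).getD 0) total
  else total + (PySem.Int.ofStr? (pvNumberStr c)).getD 0

def everyOtherDigitFromEndMultipliedByTwoAndProductsDigitsAddedTogether (cardNumber : String) : Int :=
  (PySem.List.pyRange (PySem.Str.len cardNumber - 2) (-1) (-2)).foldl
    (fun total i => pvDigitDoubled total (PySem.List.pyGetD cardNumber.toList i ' ')) 0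

-- ===== PORT B =====
-- digits = [int(c) for c in cardNumber[-2::-2]]
def pvD (c : Char) : Int := (PySem.Int.ofChars? [c]).getD 0

def everyOtherDigitFromEndMultipliedByTwoAndProductsDigitsAddedTogether_alt (cardNumber : String) : Int :=
  let digits := ((PySem.List.slice? cardNumber.toList (some (-2)) none (-2)).getD []).map pvD
  2 * digits.sum - 9 * ((digits.filter (fun d => decide (5 ≤ d))).length : Int)

-- ===== PRECONDITION & SPEC =====
-- Pre_ excludes exactly the inputs where Python A raises ValueError: int(cardNumber[i])
-- is applied to every second character from the end (positions i with len - i even), so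
-- each such character must be an ASCII digit.
def Pre_everyOtherDigitFromEndMultipliedByTwoAndProductsDigitsAddedTogether (cardNumber : String) : Prop :=
  ∀ i : Nat, i < cardNumber.toList.length → (cardNumber.toList.length - i) % 2 = 0 →
    (cardNumber.toList.getD i ' ').isDigit = true
instance (cardNumber : String) : Decidable (Pre_everyOtherDigitFromEndMultipliedByTwoAndProductsDigitsAddedTogether cardNumber) := by unfold Pre_everyOtherDigitFromEndMultipliedByTwoAndProductsDigitsAddedTogether; infer_instance

def pvWitness_everyOtherDigitFromEndMultipliedByTwoAndProductsDigitsAddedTogether : String := "4003600000000014"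

def Spec_everyOtherDigitFromEndMultipliedByTwoAndProductsDigitsAddedTogether (cardNumber : String) (out : Int) : Prop := out = everyOtherDigitFromEndMultipliedByTwoAndProductsDigitsAddedTogether_alt cardNumber
instance (cardNumber : String) (out : Int) : Decidable (Spec_everyOtherDigitFromEndMultipliedByTwoAndProductsDigitsAddedTogether cardNumber out) := by unfold Spec_everyOtherDigitFromEndMultipliedByTwoAndProductsDigitsAddedTogether; infer_instance

-- ===== CLAIM (what is proved, stated in full; the proofs are below) =====
def Claim_equal_everyOtherDigitFromEndMultipliedByTwoAndProductsDigitsAddedTogether : Prop := ∀ (cardNumber : String), Dom_everyOtherDigitFromEndMultipliedByTwoAndProductsDigitsAddedTogether cardNumber → Pre_everyOtherDigitFromEndMultipliedByTwoAndProductsDigitsAddedTogether cardNumber → Spec_everyOtherDigitFromEndMultipliedByTwoAndProductsDigitsAddedTogether cardNumber (everyOtherDigitFromEndMultipliedByTwoAndProductsDigitsAddedTogether cardNumber)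

-- ===== LEMMAS AND PROOFS =====

lemma pv_digit_mem (c : Char) (h : c.isDigit = true) : c ∈ ['0','1','2','3','4','5','6','7','8','9'] := by
  simp [Char.isDigit] at h
  have hb1 : 48 ≤ c.toNat := UInt32.le_iff_toNat_le.mp h.1
  have hb2 : c.toNat ≤ 57 := UInt32.le_iff_toNat_le.mp h.2
  have hv : c = Char.ofNat c.toNat := (Char.ofNat_toNat c).symm
  interval_cases h2 : c.toNat <;> rw [hv] <;> decide

lemma pvDigitDoubled_shift (t : Int) (c : Char) : pvDigitDoubled t c = t + pvDigitDoubled 0 c := by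
  unfold pvDigitDoubled
  split_ifs
  · rw [PySem.List.foldl_add, PySem.List.foldl_add]; ring
  · ring

lemma pv_foldl_shift (cs : List Char) : ∀ t : Int,
    cs.foldl pvDigitDoubled t = t + cs.foldl pvDigitDoubled 0 := by
  induction cs with
  | nil => intro t; simp
  | cons c cs ih =>
      intro t
      simp only [List.foldl_cons]
      rw [ih (pvDigitDoubled t c), ih (pvDigitDoubled 0 c), pvDigitDoubled_shift t c]
      ring

-- the digit-sum of 2*d, as A computes it, equals 2*d - 9*[d >= 5]
lemma pv_char_val (c : Char) (hc : c.isDigit = true) :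
    pvDigitDoubled 0 c = 2 * pvD c - 9 * (if 5 ≤ pvD c then 1 else 0) := by
  have h := pv_digit_mem c hc
  fin_cases h <;> decide

-- A's fold over digit characters equals B's aggregate formula on the mapped digits
lemma pv_key (cs : List Char) (h : ∀ c ∈ cs, c.isDigit = true) :
    cs.foldl pvDigitDoubled 0 =
      2 * (cs.map pvD).sum - 9 * (((cs.map pvD).filter (fun d => decide (5 ≤ d))).length : Int) := by
  induction cs with
  | nil => simp
  | cons c cs ih =>
      have hc := h c (List.mem_cons_self ..)
      have hrest := ih (fun x hx => h x (List.mem_cons_of_mem _ hx))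
      simp only [List.foldl_cons, List.map_cons, List.sum_cons, List.filter_cons]
      rw [pv_foldl_shift, hrest, pvDigitDoubled_shift, pv_char_val c hc]
      by_cases h5 : 5 ≤ pvD c
      · rw [if_pos h5, if_pos (by simpa using h5)]
        push_cast [List.length_cons]; ring
      · rw [if_neg h5, if_neg (by simpa using h5)]
        ring

lemma pv_filterMap_range_eq_map {α : Type} (m : Nat) (f : Nat → Option α) (g : Nat → α)
    (h : ∀ k < m, f k = some (g k)) : (List.range m).filterMap f = (List.range m).map g := by
  rw [List.filterMap_congr (g := fun k => some (g k)) (by intro x hx; exact h x (List.mem_range.mp hx))]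
  exact congrFun List.filterMap_eq_map _

-- range(len - 2, -1, -2) enumerates the indices len-2-2k for k < len/2
lemma pv_range_lemma (n : Nat) : PySem.List.pyRange ((n:Int)-2) (-1) (-2) =
    (List.range (n/2)).map (fun k : Nat => ((n:Int)-2) + (-2)*(k:Int)) := by
  simp only [PySem.List.pyRange]
  rw [if_neg (by norm_num)]
  congr 1
  split_ifs <;> congr 1 <;> norm_num <;> omega

-- xs[-2::-2] is the list of characters at those same indices, in the same order
lemma pv_slice_lemma (xs : List Char) : (PySem.List.slice? xs (some (-2)) none (-2)).getD [] =
    (List.range (xs.length/2)).map (fun k => xs.getD (xs.length - 2 - 2*k) ' ') := by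
  simp only [PySem.List.slice?, PySem.List.sliceIndices]
  rw [if_neg (by norm_num)]
  norm_num
  by_cases hn : 2 ≤ xs.length
  · have hmax : max (-2 + (xs.length:Int)) (-1) = (xs.length:Int) - 2 := by omega
    rw [hmax, if_pos (by omega)]
    have hcount : (((xs.length:Int) - 2 + 1 + 2 - 1) / 2).toNat = xs.length/2 := by omega
    rw [hcount]
    apply pv_filterMap_range_eq_map
    intro k hk
    have hlt : xs.length - 2 - 2*k < xs.length := by omega
    have h1 : ((xs.length:Int) - 2 + -(2*(k:Int))).toNat = xs.length - 2 - 2*k := by omega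
    rw [h1, List.getElem?_eq_getElem hlt]
    simp
  · have h0 : xs.length / 2 = 0 := by omega
    have hmax : max (-2 + (xs.length:Int)) (-1) = -1 := by omega
    rw [hmax, if_neg (by omega), h0]
    simp

-- ===== VERDICT (by name: the statement is the Claim_ definition above) =====
theorem everyOtherDigitFromEndMultipliedByTwoAndProductsDigitsAddedTogether_spec : Claim_equal_everyOtherDigitFromEndMultipliedByTwoAndProductsDigitsAddedTogether := by
  intro s _ hpre
  unfold Spec_everyOtherDigitFromEndMultipliedByTwoAndProductsDigitsAddedTogether everyOtherDigitFromEndMultipliedByTwoAndProductsDigitsAddedTogether everyOtherDigitFromEndMultipliedByTwoAndProductsDigitsAddedTogether_alt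
  rw [PySem.Str.len_eq, pv_range_lemma s.toList.length, pv_slice_lemma s.toList,
    List.foldl_map]
  have hfold : List.foldl (fun (x : Int) (y : Nat) => pvDigitDoubled x
        (PySem.List.pyGetD s.toList ((s.toList.length:Int) - 2 + -2 * (y:Int)) ' ')) 0
        (List.range (s.toList.length/2)) =
      ((List.range (s.toList.length/2)).map
        (fun k => s.toList.getD (s.toList.length - 2 - 2*k) ' ')).foldl pvDigitDoubled 0 := by
    rw [List.foldl_map]
    apply PySem.List.foldl_congr_mem
    intro t k hk
    have hk2 : k < s.toList.length / 2 := List.mem_range.mp hk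
    have hcast : ((s.toList.length:Int)-2) + (-2)*(k:Int) = ((s.toList.length - 2 - 2*k : Nat) : Int) := by
      omega
    rw [show (s.toList.length:Int) - 2 + -2 * (k:Int) = ((s.toList.length - 2 - 2*k : Nat) : Int) by omega,
      PySem.List.pyGetD_natCast]
  rw [hfold]
  apply pv_key
  intro c hc
  obtain ⟨k, hk, rfl⟩ := List.mem_map.mp hc
  have hk2 : k < s.toList.length / 2 := List.mem_range.mp hk
  exact hpre _ (by omega) (by omega)
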